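-- pv_equiv track=rewrite | github.com/ChouTatsumi/COMP30024-SS | search.py | offset
-- ===== SOURCE A (Python) =====
-- def offset(lst, state):
--     output = 0
--     flag = False
--
--     for i in range(0, len(lst) - 1):
--         if lst[i] in state.keys():
--             if not flag:
--                 flag = True
--                 output -= 1
--             else:
--                 output += 2
--         else:
--             if flag:
--                 flag = False
--
--     return output
-- ===== SOURCE B (Python) =====
-- def offset(lst, state):
--     keys = set(state)
--     mem = [x in keys for x in lst[:len(lst) - 1]]
--     inside = sum(mem)
--     runs = sum(1 for prev, cur in zip([False] + mem, mem) if cur and not prev)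
--     return 2 * inside - 3 * runs
-- ===== Notes on version B (the rewrite author's own statement) =====
-- stated objective: alternative
-- what changed: Replaced the flag-carrying index loop with a closed-form count: build the membership mask of the scanned prefix once, then return 2*(members) - 3*(run starts), since each maximal run of length L contributes 2L-3.
import Mathlib
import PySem

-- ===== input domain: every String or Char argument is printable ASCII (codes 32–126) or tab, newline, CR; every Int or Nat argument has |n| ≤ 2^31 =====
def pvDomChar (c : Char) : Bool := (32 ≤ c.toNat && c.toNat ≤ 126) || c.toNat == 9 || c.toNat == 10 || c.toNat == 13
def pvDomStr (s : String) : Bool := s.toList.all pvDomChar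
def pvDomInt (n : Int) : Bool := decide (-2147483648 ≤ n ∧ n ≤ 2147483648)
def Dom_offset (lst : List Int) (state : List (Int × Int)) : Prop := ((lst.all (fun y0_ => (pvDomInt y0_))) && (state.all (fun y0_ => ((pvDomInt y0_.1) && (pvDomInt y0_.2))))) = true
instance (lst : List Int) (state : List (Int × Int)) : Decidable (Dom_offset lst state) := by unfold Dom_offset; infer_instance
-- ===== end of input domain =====

-- B replaces A's flag-carrying index loop by a one-pass membership mask of the scanned
-- prefix and the closed form 2*(members) - 3*(run starts); same return value, different decomposition.

-- ===== PORT A =====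
-- literal transliteration: for i in range(0, len(lst)-1): test lst[i] in state.keys(),
-- flag state machine over (output, flag); indices are always in range, so pyGetD is exact here
def offset (lst : List Int) (state : List (Int × Int)) : Int :=
  (((PySem.List.pyRange 0 ((lst.length : Int) - 1) 1).foldl
      (fun (s : Int × Bool) i =>
        if (state.map Prod.fst).contains (PySem.List.pyGetD lst i 0) then
          if !s.2 then (s.1 - 1, true) else (s.1 + 2, s.2)
        else
          if s.2 then (s.1, false) else s)
      (0, false)).1)

-- ===== PORT B =====
-- keys = set(state); mem = [x in keys for x in lst[:len(lst)-1]]; inside = sum(mem);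
-- runs = sum(1 for prev, cur in zip([False]+mem, mem) if cur and not prev); 2*inside - 3*runs
def offset_alt (lst : List Int) (state : List (Int × Int)) : Int :=
  let keys : PySem.Set Int := PySem.Set.ofList (state.map Prod.fst)
  let mem : List Bool := (PySem.List.slice lst none (some ((lst.length : Int) - 1))).map
      (fun x => PySem.Set.contains keys x)
  let inside : Int := (mem.countP (fun b => b) : Nat)
  let runs : Int := (((false :: mem).zip mem).countP (fun p => p.2 && !p.1) : Nat)
  2 * inside - 3 * runs

-- ===== PRECONDITION & SPEC =====
def Spec_offset (lst : List Int) (state : List (Int × Int)) (out : Int) : Prop := out = offset_alt lst state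
instance (lst : List Int) (state : List (Int × Int)) (out : Int) : Decidable (Spec_offset lst state out) := by unfold Spec_offset; infer_instance

-- ===== CLAIM (what is proved, stated in full; the proofs are below) =====
def Claim_equal_offset : Prop := ∀ (lst : List Int) (state : List (Int × Int)), Dom_offset lst state → Spec_offset lst state (offset lst state)

-- ===== LEMMAS AND PROOFS =====

-- A's loop body as a function of the membership bit (proof helper)
def stepA (s : Int × Bool) (b : Bool) : Int × Bool :=
  if b then (if !s.2 then (s.1 - 1, true) else (s.1 + 2, s.2))
  else (if s.2 then (s.1, false) else s)

-- number of maximal runs of 'true', given whether the previous element was true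
def runsF : Bool → List Bool → Nat
  | _, [] => 0
  | prev, b :: bs => (if b && !prev then 1 else 0) + runsF b bs

theorem zip_countP_eq_runsF (fl : Bool) (bs : List Bool) :
    ((fl :: bs).zip bs).countP (fun p => p.2 && !p.1) = runsF fl bs := by
  induction bs generalizing fl with
  | nil => rfl
  | cons b rest ih =>
      simp only [List.zip_cons_cons, List.countP_cons, runsF, ih b]
      cases b <;> cases fl <;> simp [Nat.add_comm]

theorem foldl_stepA_eq (bs : List Bool) (o : Int) (fl : Bool) :
    (bs.foldl stepA (o, fl)).1
      = o + 2 * (bs.countP (fun b => b) : Int) - 3 * (runsF fl bs : Int) := by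
  induction bs generalizing o fl with
  | nil => simp [runsF]
  | cons b rest ih =>
      cases b <;> cases fl
      · rw [List.foldl_cons, show stepA (o, false) false = (o, false) from rfl, ih]
        simp [runsF]
      · rw [List.foldl_cons, show stepA (o, true) false = (o, false) from rfl, ih]
        simp [runsF]
      · rw [List.foldl_cons, show stepA (o, false) true = (o - 1, true) from rfl, ih]
        simp [runsF]; ring
      · rw [List.foldl_cons, show stepA (o, true) true = (o + 2, true) from rfl, ih]
        simp [runsF]; ring

theorem contains_ofList (ks : List Int) (x : Int) :
    (PySem.Set.ofList ks).contains x = ks.contains x := by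
  simp [PySem.Set.mem_ofList]

theorem offset_eq (lst : List Int) (state : List (Int × Int)) :
    offset lst state = offset_alt lst state := by
  simp only [offset, offset_alt]
  have hcont : (fun x => PySem.Set.contains (PySem.Set.ofList (state.map Prod.fst)) x)
      = fun x => (state.map Prod.fst).contains x := by
    funext x; exact contains_ofList _ x
  cases lst with
  | nil => simp [PySem.List.slice]
  | cons a tl =>
      set p := (a :: tl).dropLast with hp
      have hlen : ((a :: tl).length : Int) - 1 = ((p.length : Nat) : Int) := by
        simp [hp, List.length_dropLast]
      rw [hlen]
      have h : ∀ (acc : Int × Bool), ∀ i ∈ PySem.List.pyRange 0 ((p.length : Nat) : Int) 1,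
          (fun (s : Int × Bool) i =>
            if (state.map Prod.fst).contains (PySem.List.pyGetD (a :: tl) i 0) then
              if !s.2 then (s.1 - 1, true) else (s.1 + 2, s.2)
            else
              if s.2 then (s.1, false) else s) acc i
          = (fun (s : Int × Bool) i =>
              stepA s ((state.map Prod.fst).contains (PySem.List.pyGetD p i 0))) acc i := by
        intro acc i hi
        rw [PySem.List.mem_pyRange_one] at hi
        have h1 : i < ((p.length : Nat) : Int) := hi.2
        have h2 : i < (((a :: tl).length : Nat) : Int) := by
          simp only [hp, List.length_dropLast] at h1 ⊢
          omega
        beta_reduce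
        have hget : PySem.List.pyGetD (a :: tl) i 0 = PySem.List.pyGetD p i 0 := by
          rw [PySem.List.pyGetD_eq_getElem _ 0 hi.1 h1,
              PySem.List.pyGetD_eq_getElem _ 0 hi.1 h2]
          have hn : i.toNat < p.length := by omega
          exact (List.getElem_dropLast hn).symm
        rw [hget]; rfl
      rw [PySem.List.foldl_congr_mem _ _ _ _ h]
      rw [PySem.List.foldl_pyRange_zero_pyGetD' p 0
        (fun (s : Int × Bool) b => stepA s ((state.map Prod.fst).contains b)) (0, false)]
      rw [← List.foldl_map]
      rw [foldl_stepA_eq]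
      rw [hcont, PySem.List.slice_to_natCast]
      rw [show (a :: tl).take p.length = p from by
        rw [hp, List.length_dropLast, ← List.dropLast_eq_take]]
      rw [zip_countP_eq_runsF]
      ring

-- ===== VERDICT (by name: the statement is the Claim_ definition above) =====
theorem offset_spec : Claim_equal_offset := by
  intro lst state _
  exact offset_eq lst state
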